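-- pv_equiv track=rewrite | github.com/baolongsun/Jianzhioffer | huawei/分奖金-单调栈.py | result
-- ===== SOURCE A (Python) =====
-- def result(arr,n):
--     stack = []#存放位置以及对应的值
--     nexbig = [-1]*n#初始化位置为-1,否则存放第一个比其大的数字
--     for i in range(n):
--         while stack:
--             idx,val = stack[-1]#栈顶元素
--             if arr[i] > val:
--                 stack.pop()
--                 nexbig[idx] = i
--             else:
--                 break
--         stack.append([i,arr[i]])
--     ans = []
--     for i in range(n):
--         idx = nexbig[i]
--         if idx == -1:
--             ans.append(arr[i])
--         else:
--             ans.append((idx-i)*(arr[idx]-arr[i]))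
--     return ans
-- ===== SOURCE B (Python) =====
-- def result(arr, n):
--     ans = []
--     for i in range(n):
--         nb = -1
--         for j in range(i + 1, n):
--             if arr[j] > arr[i]:
--                 nb = j
--                 break
--         if nb == -1:
--             ans.append(arr[i])
--         else:
--             ans.append((nb - i) * (arr[nb] - arr[i]))
--     return ans
-- ===== Notes on version B (the rewrite author's own statement) =====
-- stated objective: simpler
-- what changed: Replaces A's monotonic-stack single pass (stack of [index, value] pairs plus a nexbig array updated on pops) by a direct per-index forward scan that finds the first later element with a greater value, then applies the same product formula.
import Mathlib
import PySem

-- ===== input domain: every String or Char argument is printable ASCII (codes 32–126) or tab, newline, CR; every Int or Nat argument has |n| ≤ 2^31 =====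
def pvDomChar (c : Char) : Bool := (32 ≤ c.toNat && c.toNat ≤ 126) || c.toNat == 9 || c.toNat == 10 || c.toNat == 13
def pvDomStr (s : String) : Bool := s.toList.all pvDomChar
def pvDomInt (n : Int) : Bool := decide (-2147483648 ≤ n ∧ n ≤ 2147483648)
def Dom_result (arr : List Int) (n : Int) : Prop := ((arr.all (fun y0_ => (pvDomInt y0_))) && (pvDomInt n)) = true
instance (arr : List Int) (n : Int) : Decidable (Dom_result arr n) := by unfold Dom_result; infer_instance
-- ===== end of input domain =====

-- B replaces A's one-pass monotonic stack by a direct forward scan per index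
-- (first later j with arr[j] > arr[i]); objective: simpler (no stack state), not faster.

-- ===== PORT A =====
-- the inner `while stack: … pop / break` loop of A; stack top = list head
def resultPop (arr : List Int) (i : Int) :
    List (Int × Int) → List Int → List (Int × Int) × List Int
  | [], nex => ([], nex)
  | (idx, val) :: rest, nex =>
    if PySem.List.pyGetD arr i 0 > val then
      resultPop arr i rest (PySem.List.pySetD nex idx i)
    else ((idx, val) :: rest, nex)

def result (arr : List Int) (n : Int) : List Int :=
  let st :=
    (PySem.List.pyRange 0 n 1).foldl
      (fun (st : List (Int × Int) × List Int) i =>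
        let popped := resultPop arr i st.1 st.2
        ((i, PySem.List.pyGetD arr i 0) :: popped.1, popped.2))
      ([], PySem.List.pyRepeat [(-1 : Int)] n)
  (PySem.List.pyRange 0 n 1).foldl
    (fun ans i =>
      let idx := PySem.List.pyGetD st.2 i 0
      if idx = -1 then ans ++ [PySem.List.pyGetD arr i 0]
      else ans ++ [(idx - i) * (PySem.List.pyGetD arr idx 0 - PySem.List.pyGetD arr i 0)])
    []

-- ===== PORT B =====
-- the inner `for j in range(i+1, n): … break` loop of Source B
def resultFind (arr : List Int) (i : Int) : List Int → Int
  | [] => -1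
  | j :: rest =>
    if PySem.List.pyGetD arr j 0 > PySem.List.pyGetD arr i 0 then j
    else resultFind arr i rest

def result_alt (arr : List Int) (n : Int) : List Int :=
  (PySem.List.pyRange 0 n 1).foldl
    (fun ans i =>
      let nb := resultFind arr i (PySem.List.pyRange (i + 1) n 1)
      if nb = -1 then ans ++ [PySem.List.pyGetD arr i 0]
      else ans ++ [(nb - i) * (PySem.List.pyGetD arr nb 0 - PySem.List.pyGetD arr i 0)])
    []

-- ===== PRECONDITION & SPEC =====
-- Pre_ excludes exactly the inputs where Python A raises IndexError: arr[i] with len(arr) < n.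
def Pre_result (arr : List Int) (n : Int) : Prop := n ≤ (arr.length : Int)
instance (arr : List Int) (n : Int) : Decidable (Pre_result arr n) := by unfold Pre_result; infer_instance
def pvWitness_result : List Int × Int := ([2, 1, 3], 3)

def Spec_result (arr : List Int) (n : Int) (out : List Int) : Prop := out = result_alt arr n
instance (arr : List Int) (n : Int) (out : List Int) : Decidable (Spec_result arr n out) := by unfold Spec_result; infer_instance

-- ===== CLAIM (what is proved, stated in full; the proofs are below) =====
def Claim_equal_result : Prop := ∀ (arr : List Int) (n : Int), Dom_result arr n → Pre_result arr n → Spec_result arr n (result arr n)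

-- ===== LEMMAS AND PROOFS =====

-- value at a Nat index (both ports read arr[i] through pyGetD with default 0)
def gv (arr : List Int) (k : Nat) : Int := arr.getD k 0

-- the next-greater value stored by A's nexbig: first j in (k, m) with arr[j] > arr[k], else -1
def ng (arr : List Int) (m k : Nat) : Int :=
  match (List.range' (k + 1) (m - (k + 1))).find? (fun j => decide (gv arr k < gv arr j)) with
  | some j => (j : Int)
  | none => -1

-- "no j in (k, i) has a value greater than arr[k]" — the stack-membership condition
def keep (arr : List Int) (i k : Nat) : Bool := decide (∀ j < i, k < j → gv arr j ≤ gv arr k)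

theorem keep_iff (arr : List Int) (i k : Nat) :
    keep arr i k = true ↔
      (List.range' (k + 1) (i - (k + 1))).find? (fun j => decide (gv arr k < gv arr j)) = none := by
  rw [List.find?_eq_none]
  simp only [keep, decide_eq_true_eq, List.mem_range'_1]
  constructor
  · rintro h j ⟨h1, h2⟩
    exact not_lt.2 (h j (by omega) (by omega))
  · intro h j hji hkj
    exact not_lt.1 (h j ⟨by omega, by omega⟩)

theorem ng_small (arr : List Int) (m k : Nat) (h : m ≤ k + 1) : ng arr m k = -1 := by
  unfold ng
  rw [show m - (k + 1) = 0 from by omega]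
  rfl

theorem ng_succ (arr : List Int) (i k : Nat) (hk : k < i) :
    ng arr (i + 1) k =
      match (List.range' (k + 1) (i - (k + 1))).find? (fun j => decide (gv arr k < gv arr j)) with
      | some j => (j : Int)
      | none => if gv arr k < gv arr i then (i : Int) else -1 := by
  unfold ng
  rw [show (i + 1) - (k + 1) = (i - (k + 1)) + 1 from by omega, List.range'_1_concat,
    List.find?_append, show k + 1 + (i - (k + 1)) = i from by omega]
  cases hf : (List.range' (k + 1) (i - (k + 1))).find? (fun j => decide (gv arr k < gv arr j)) with
  | some j => rfl
  | none =>
    simp only [Option.none_or, List.find?_singleton]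
    by_cases h : gv arr k < gv arr i
    · simp [h]
    · simp [h]

theorem foldl_set_getElem? (v : Int) (P : List Nat) (nex : List Int)
    (hlt : ∀ p ∈ P, p < nex.length) (k : Nat) :
    (P.foldl (fun nx p => nx.set p v) nex)[k]? = if k ∈ P then some v else nex[k]? := by
  induction P generalizing nex with
  | nil => simp
  | cons p rest ih =>
    simp only [List.foldl_cons]
    rw [ih (nex.set p v) (by intro q hq; rw [List.length_set]; exact hlt q (List.mem_cons_of_mem _ hq))]
    by_cases hk : k ∈ rest
    · simp [hk]
    · by_cases hkp : k = p
      · subst hkp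
        simp [hk, hlt k (List.mem_cons_self)]
      · simp [hk, hkp, List.getElem?_set_ne (fun h => hkp h.symm)]

-- the while-loop splits a well-formed stack into popped prefix and surviving suffix
theorem resultPop_eq (arr : List Int) (i : Nat) (s : List Nat) (nex : List Int)
    (hdec : s.Pairwise (fun a b => b < a))
    (hmem : ∀ k ∈ s, k < i ∧ ∀ j < i, k < j → gv arr j ≤ gv arr k) :
    resultPop arr (i : Int) (s.map (fun k : Nat => ((k : Int), gv arr k))) nex =
      ((s.filter (fun k : Nat => decide (gv arr i ≤ gv arr k))).map (fun k : Nat => ((k : Int), gv arr k)),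
       (s.filter (fun k : Nat => decide (gv arr k < gv arr i))).foldl
         (fun nx p => nx.set p (i : Int)) nex) := by
  revert hdec hmem
  induction s generalizing nex with
  | nil => intro _ _; simp [resultPop]
  | cons k0 rest ih =>
    intro hdec hmem
    simp only [List.map_cons, resultPop, PySem.List.pyGetD_natCast]
    by_cases h : gv arr k0 < gv arr i
    · rw [if_pos (show arr.getD i 0 > gv arr k0 from h)]
      rw [show PySem.List.pySetD nex ((k0 : Nat) : Int) ((i : Nat) : Int) = nex.set k0 (i : Int)
        from by simp]
      rw [ih (nex.set k0 (i : Int)) (List.Pairwise.of_cons hdec)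
        (fun k hk => hmem k (List.mem_cons_of_mem _ hk))]
      rw [List.filter_cons_of_neg (by simpa using not_le.2 h),
        List.filter_cons_of_pos (by simpa using h), List.foldl_cons]
    · rw [if_neg (show ¬ arr.getD i 0 > gv arr k0 from h)]
      have hk0lt : k0 < i := (hmem k0 List.mem_cons_self).1
      have hrest : ∀ k ∈ rest, gv arr i ≤ gv arr k := by
        intro k hk
        have hkk0 : k < k0 := (List.pairwise_cons.1 hdec).1 k hk
        have := (hmem k (List.mem_cons_of_mem _ hk)).2 k0 hk0lt hkk0
        exact le_trans (not_lt.1 h) this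
      rw [List.filter_cons_of_pos (by simpa using not_lt.1 h),
        List.filter_cons_of_neg (by simpa using h)]
      rw [List.filter_eq_self.2 (fun k hk => by simpa using hrest k hk),
        List.filter_eq_nil_iff.2 (fun k hk => by simpa using not_lt.2 (hrest k hk)),
        List.foldl_nil, List.map_cons]

theorem keep_succ_self (arr : List Int) (i : Nat) : keep arr (i + 1) i = true := by
  simp only [keep, decide_eq_true_eq]
  intro j h1 h2; omega

theorem keep_succ (arr : List Int) (i k : Nat) (hk : k < i) :
    keep arr (i + 1) k = (keep arr i k && decide (gv arr i ≤ gv arr k)) := by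
  unfold keep
  have hiff : (∀ j < i + 1, k < j → gv arr j ≤ gv arr k) ↔
      ((∀ j < i, k < j → gv arr j ≤ gv arr k) ∧ gv arr i ≤ gv arr k) := by
    constructor
    · intro h
      exact ⟨fun j h1 h2 => h j (by omega) h2, h i (by omega) hk⟩
    · rintro ⟨h1, h2⟩ j hj hkj
      by_cases hji : j = i
      · subst hji; exact h2
      · exact h1 j (by omega) hkj
  rw [show (decide (∀ j < i + 1, k < j → gv arr j ≤ gv arr k)) =
      decide ((∀ j < i, k < j → gv arr j ≤ gv arr k) ∧ gv arr i ≤ gv arr k) from by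
    exact decide_eq_decide.2 hiff]
  by_cases h1 : ∀ j < i, k < j → gv arr j ≤ gv arr k <;>
    by_cases h2 : gv arr i ≤ gv arr k <;>
      simp [h1, h2]

-- the loop invariant of A's first pass: stack = kept indices (top first), nexbig = ng so far
theorem loopA_invariant (arr : List Int) (n' i : Nat) (hi : i ≤ n') :
    (PySem.List.pyRange 0 (i : Int) 1).foldl
      (fun (st : List (Int × Int) × List Int) i =>
        let popped := resultPop arr i st.1 st.2
        ((i, PySem.List.pyGetD arr i 0) :: popped.1, popped.2))
      ([], List.replicate n' (-1)) =
    (((List.range i).filter (keep arr i)).reverse.map (fun k : Nat => ((k : Int), gv arr k)),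
     (List.range n').map (fun k => ng arr i k)) := by
  revert hi
  induction i with
  | zero =>
    intro _
    rw [PySem.List.pyRange_one_eq_nil (by simp : ((0 : Nat) : Int) ≤ 0)]
    simp only [List.range_zero, List.foldl_nil, List.filter_nil, List.reverse_nil, List.map_nil]
    rw [List.map_congr_left (fun k _ => ng_small arr 0 k (by omega)),
      List.map_const', List.length_range]
  | succ i ih =>
    intro hi
    have hii : i ≤ n' := by omega
    rw [show ((i + 1 : Nat) : Int) = (i : Int) + 1 from by push_cast; ring,
      PySem.List.pyRange_one_succ_right (Int.natCast_nonneg i),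
      List.foldl_append, ih hii, List.foldl_cons, List.foldl_nil]
    have hdec : (((List.range i).filter (keep arr i)).reverse).Pairwise (fun a b => b < a) := by
      rw [List.pairwise_reverse]
      exact ((List.pairwise_lt_range (n := i)).filter _)
    have hmem : ∀ k ∈ ((List.range i).filter (keep arr i)).reverse,
        k < i ∧ ∀ j < i, k < j → gv arr j ≤ gv arr k := by
      intro k hk
      rw [List.mem_reverse, List.mem_filter, List.mem_range] at hk
      refine ⟨hk.1, ?_⟩
      have := hk.2
      simpa only [keep, decide_eq_true_eq] using this
    dsimp only
    rw [resultPop_eq arr i _ _ hdec hmem]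
    simp only [Prod.mk.injEq]
    constructor
    · -- stack component
      have hfilters : (List.range i).filter (keep arr (i + 1)) =
          ((List.range i).filter (keep arr i)).filter
            (fun k : Nat => decide (gv arr i ≤ gv arr k)) := by
        rw [List.filter_filter]
        exact List.filter_congr (fun k hk => by
          rw [keep_succ arr i k (List.mem_range.1 hk), Bool.and_comm])
      rw [List.range_succ, List.filter_append,
        List.filter_cons_of_pos (keep_succ_self arr i), List.filter_nil,
        List.reverse_append, List.reverse_cons, List.reverse_nil, List.nil_append,
        List.singleton_append, List.map_cons]
      rw [hfilters, ← List.filter_reverse]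
      simp [gv]
    · -- nexbig component
      apply List.ext_getElem?
      intro t
      rw [foldl_set_getElem?]
      · by_cases htP : t ∈ ((List.range i).filter (keep arr i)).reverse.filter
            (fun k : Nat => decide (gv arr k < gv arr i))
        · rw [if_pos htP]
          rw [List.mem_filter, List.mem_reverse, List.mem_filter, List.mem_range] at htP
          obtain ⟨⟨hti, htkeep⟩, htlt⟩ := htP
          rw [decide_eq_true_eq] at htlt
          have htn : t < n' := by omega
          rw [List.getElem?_map, List.getElem?_range htn]
          simp only [Option.map_some]
          rw [ng_succ arr i t hti, (keep_iff arr i t).1 htkeep]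
          simp [htlt]
        · rw [if_neg htP]
          by_cases htn : t < n'
          · rw [List.getElem?_map, List.getElem?_map, List.getElem?_range htn]
            simp only [Option.map_some, Option.some.injEq]
            by_cases hti : t < i
            · rw [ng_succ arr i t hti]
              cases hf : (List.range' (t + 1) (i - (t + 1))).find?
                  (fun j => decide (gv arr t < gv arr j)) with
              | some j => unfold ng; rw [hf]
              | none =>
                have hkeep : keep arr i t = true := (keep_iff arr i t).2 hf
                have hnot : ¬ gv arr t < gv arr i := by
                  intro hc
                  exact htP (by
                    rw [List.mem_filter, List.mem_reverse, List.mem_filter, List.mem_range]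
                    exact ⟨⟨hti, hkeep⟩, by simpa using hc⟩)
                unfold ng; rw [hf]
                simp [hnot]
            · rw [ng_small arr i t (by omega), ng_small arr (i + 1) t (by omega)]
          · rw [List.getElem?_eq_none (by simpa using htn),
              List.getElem?_eq_none (by simpa using htn)]
      · intro p hp
        rw [List.mem_filter, List.mem_reverse, List.mem_filter, List.mem_range] at hp
        rw [List.length_map, List.length_range]
        omega

-- B's inner loop computes find?-of-first-greater over a list of Nat indices
theorem resultFind_eq (arr : List Int) (i : Nat) (l : List Nat) :
    resultFind arr (i : Int) (l.map (fun k : Nat => (k : Int))) =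
      match l.find? (fun j => decide (gv arr i < gv arr j)) with
      | some j => (j : Int)
      | none => -1 := by
  induction l with
  | nil => rfl
  | cons j rest ih =>
    rw [List.map_cons]
    simp only [resultFind, PySem.List.pyGetD_natCast]
    by_cases h : gv arr i < gv arr j
    · rw [if_pos (show arr.getD j 0 > arr.getD i 0 from h),
        List.find?_cons_of_pos (by simpa using h)]
    · rw [if_neg (show ¬ arr.getD j 0 > arr.getD i 0 from h),
        List.find?_cons_of_neg (by simpa using h), ih]

theorem pyRange_cast (n' k : Nat) :
    PySem.List.pyRange ((k : Int) + 1) (n' : Int) 1 =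
      (List.range' (k + 1) (n' - (k + 1))).map (fun t : Nat => (t : Int)) := by
  rw [PySem.List.pyRange_one, List.range'_eq_map_range, List.map_map,
    show ((n' : Int) - ((k : Int) + 1)).toNat = n' - (k + 1) from by omega]
  apply List.map_congr_left
  intro t _
  simp only [Function.comp_apply]
  push_cast
  ring

theorem final_eq (arr : List Int) (n : Int) : result arr n = result_alt arr n := by
  by_cases hn : n ≤ 0
  · simp [result, result_alt, PySem.List.pyRange_one_eq_nil hn]
  · obtain ⟨n', rfl⟩ : ∃ n' : Nat, n = (n' : Int) := ⟨n.toNat, by omega⟩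
    unfold result result_alt
    rw [show PySem.List.pyRepeat [(-1 : Int)] (n' : Int) = List.replicate n' (-1) from by
      rw [PySem.List.pyRepeat_singleton]; simp]
    rw [loopA_invariant arr n' n' le_rfl]
    apply PySem.List.foldl_congr_mem'
    intro x hx ans
    obtain ⟨k, rfl, hk⟩ : ∃ k : Nat, x = (k : Int) ∧ k < n' := by
      rw [PySem.List.mem_pyRange_one] at hx
      exact ⟨x.toNat, by omega, by omega⟩
    have hidx : PySem.List.pyGetD ((List.range n').map (fun k => ng arr n' k)) ((k : Nat) : Int) 0
        = ng arr n' k := by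
      rw [PySem.List.pyGetD_natCast, PySem.List.getD_map_range _ _ _ _ hk]
    have hnb : resultFind arr ((k : Nat) : Int) (PySem.List.pyRange (((k : Nat) : Int) + 1) (n' : Int) 1)
        = ng arr n' k := by
      rw [pyRange_cast n' k, resultFind_eq]
      rfl
    dsimp only
    rw [hidx, hnb]

-- ===== VERDICT (by name: the statement is the Claim_ definition above) =====
theorem result_spec : Claim_equal_result := by
  intro arr n _ _
  unfold Spec_result
  exact final_eq arr n
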